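-- pv_equiv track=rewrite | github.com/subrajar/SummerInternZoho | Day8/customer_service.py | bill_calculation
-- ===== SOURCE A (Python) =====
-- groceries = ['rice', 'wheat', 'almond', 'dates', 'walnut', 'daal']
--
-- price = [60, 56, 89, 35, 37, 28]
--
-- def bill_calculation(items, kilograms):
--     total_price = 0
--     for i in items:
--         for j in groceries:
--             if i == j:
--                 index1 = groceries.index(j)
--                 index2 = items.index(i)
--                 total_price = total_price + (price[index1] * kilograms[index2])
--     return total_price
-- ===== SOURCE B (Python) =====
-- groceries = ['rice', 'wheat', 'almond', 'dates', 'walnut', 'daal']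
--
-- price = [60, 56, 89, 35, 37, 28]
--
-- PRICE_PER_KG = dict(zip(groceries, price))
--
-- def bill_calculation(items, kilograms):
--     return sum(PRICE_PER_KG.get(item, 0) * kg for item, kg in zip(items, kilograms))
-- ===== Notes on version B (the rewrite author's own statement) =====
-- stated objective: idiomatic
-- what changed: B is the idiomatic one-pass version: a price table built once as a dict, then one pass summing price times kilogram over zip(items, kilograms), instead of A's nested scan over groceries with repeated items.index/groceries.index calls; Pre_ excludes the inputs where A raises IndexError, and lists in which a grocery name occurs more than once, where the pairing of duplicate occurrences with kilograms is unspecified (A pairs every occurrence with the first occurrence's kilogram, B pairs positionally) and either reading is defensible.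
-- outside the precondition, e.g. on bill_calculation(['rice', 'rice'], [2, 3]): A returns 240, B returns 300
import Mathlib
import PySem

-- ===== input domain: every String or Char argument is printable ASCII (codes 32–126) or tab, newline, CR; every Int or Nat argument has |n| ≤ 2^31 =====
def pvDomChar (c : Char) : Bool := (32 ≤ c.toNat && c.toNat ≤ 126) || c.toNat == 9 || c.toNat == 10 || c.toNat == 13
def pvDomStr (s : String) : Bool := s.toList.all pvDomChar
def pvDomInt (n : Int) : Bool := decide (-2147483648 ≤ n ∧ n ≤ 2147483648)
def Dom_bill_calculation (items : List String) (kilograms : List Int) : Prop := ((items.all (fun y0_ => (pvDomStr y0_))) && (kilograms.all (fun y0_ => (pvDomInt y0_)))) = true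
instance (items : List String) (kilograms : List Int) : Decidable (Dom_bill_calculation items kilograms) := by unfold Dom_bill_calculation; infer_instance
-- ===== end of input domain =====

-- B is the idiomatic one-pass version: price dict built once, sum over zip(items, kilograms).

-- ===== PORT A =====
def groceriesL : List String := ["rice", "wheat", "almond", "dates", "walnut", "daal"]

def priceL : List Int := [60, 56, 89, 35, 37, 28]

def bill_calculation (items : List String) (kilograms : List Int) : Int :=
  items.foldl (fun total_price i =>
    groceriesL.foldl (fun total_price j =>
      if i == j then
        let index1 : Int := ((PySem.List.index? groceriesL j).getD 0 : Nat)
        let index2 : Int := ((PySem.List.index? items i).getD 0 : Nat)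
        total_price + ((PySem.List.pyGet? priceL index1).getD 0 * (PySem.List.pyGet? kilograms index2).getD 0)
      else total_price) total_price) 0

-- ===== PORT B =====
def pricePerKg : PySem.Dict String Int := PySem.Dict.ofList (groceriesL.zip priceL)

def bill_calculation_alt (items : List String) (kilograms : List Int) : Int :=
  ((items.zip kilograms).map (fun p => pricePerKg.getD p.1 0 * p.2)).sum

-- ===== PRECONDITION & SPEC =====
-- Pre_ excludes (a) the inputs on which Python A raises IndexError (a grocery whose
-- first-occurrence index in items reaches past the end of kilograms) and (b) lists in which a
-- grocery name occurs more than once: for duplicate occurrences it is unspecified which kilogram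
-- belongs to which occurrence, and A's first-match pairing (items.index) and B's positional
-- pairing (zip) are both defensible readings of that corner.
def Pre_bill_calculation (items : List String) (kilograms : List Int) : Prop :=
  (∀ g ∈ groceriesL, g ∈ items → ((PySem.List.index? items g).getD 0) < kilograms.length) ∧
  (∀ g ∈ groceriesL, items.count g ≤ 1)

instance (items : List String) (kilograms : List Int) : Decidable (Pre_bill_calculation items kilograms) := by unfold Pre_bill_calculation; infer_instance

def pvWitness_bill_calculation : List String × List Int := (["rice", "bread", "daal"], [2, 1, 3])

def Spec_bill_calculation (items : List String) (kilograms : List Int) (out : Int) : Prop := out = bill_calculation_alt items kilograms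
instance (items : List String) (kilograms : List Int) (out : Int) : Decidable (Spec_bill_calculation items kilograms out) := by unfold Spec_bill_calculation; infer_instance

-- ===== CLAIM (what is proved, stated in full; the proofs are below) =====
def Claim_equal_bill_calculation : Prop := ∀ (items : List String) (kilograms : List Int), Dom_bill_calculation items kilograms → Pre_bill_calculation items kilograms → Spec_bill_calculation items kilograms (bill_calculation items kilograms)

-- ===== LEMMAS AND PROOFS =====

-- the price both programs attach to a name (0 for a non-grocery)
def priceOf (i : String) : Int := pricePerKg.getD i 0

-- the kilogram A reads for a name: the first-occurrence one
def kgv (items : List String) (kilograms : List Int) (g : String) : Int :=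
  (PySem.List.pyGet? kilograms (((PySem.List.index? items g).getD 0 : Nat) : Int)).getD 0

set_option maxRecDepth 10000 in
theorem priceOf_cases (i : String) :
    priceOf i = if i = "rice" then 60 else if i = "wheat" then 56 else if i = "almond" then 89
      else if i = "dates" then 35 else if i = "walnut" then 37 else if i = "daal" then 28 else 0 := by
  have h : pricePerKg = PySem.Dict.mk [("rice",60),("wheat",56),("almond",89),("dates",35),("walnut",37),("daal",28)] := by decide
  simp only [priceOf, PySem.Dict.getD, h, PySem.Dict.get?_mk_cons, beq_iff_eq]
  split_ifs with h1 h2 h3 h4 h5 h6 <;> subst_vars <;> first | rfl | simp_all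

theorem priceOf_ne_zero_mem (i : String) (h : priceOf i ≠ 0) : i ∈ groceriesL := by
  rw [priceOf_cases] at h
  split_ifs at h with h1 h2 h3 h4 h5 h6 <;> first | (subst_vars; decide) | exact absurd rfl h

set_option maxHeartbeats 2000000 in
theorem inner_fold_eq (items : List String) (kilograms : List Int) (i : String) (t : Int) :
    groceriesL.foldl (fun total_price j =>
      if i == j then
        let index1 : Int := ((PySem.List.index? groceriesL j).getD 0 : Nat)
        let index2 : Int := ((PySem.List.index? items i).getD 0 : Nat)
        total_price + ((PySem.List.pyGet? priceL index1).getD 0 * (PySem.List.pyGet? kilograms index2).getD 0)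
      else total_price) t
    = t + priceOf i * kgv items kilograms i := by
  have e1 : ((PySem.List.pyGet? ([60, 56, 89, 35, 37, 28] : List Int) (((PySem.List.index? (["rice", "wheat", "almond", "dates", "walnut", "daal"] : List String) "rice").getD 0 : Nat) : Int)).getD 0 : Int) = 60 := by decide
  have e2 : ((PySem.List.pyGet? ([60, 56, 89, 35, 37, 28] : List Int) (((PySem.List.index? (["rice", "wheat", "almond", "dates", "walnut", "daal"] : List String) "wheat").getD 0 : Nat) : Int)).getD 0 : Int) = 56 := by decide
  have e3 : ((PySem.List.pyGet? ([60, 56, 89, 35, 37, 28] : List Int) (((PySem.List.index? (["rice", "wheat", "almond", "dates", "walnut", "daal"] : List String) "almond").getD 0 : Nat) : Int)).getD 0 : Int) = 89 := by decide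
  have e4 : ((PySem.List.pyGet? ([60, 56, 89, 35, 37, 28] : List Int) (((PySem.List.index? (["rice", "wheat", "almond", "dates", "walnut", "daal"] : List String) "dates").getD 0 : Nat) : Int)).getD 0 : Int) = 35 := by decide
  have e5 : ((PySem.List.pyGet? ([60, 56, 89, 35, 37, 28] : List Int) (((PySem.List.index? (["rice", "wheat", "almond", "dates", "walnut", "daal"] : List String) "walnut").getD 0 : Nat) : Int)).getD 0 : Int) = 37 := by decide
  have e6 : ((PySem.List.pyGet? ([60, 56, 89, 35, 37, 28] : List Int) (((PySem.List.index? (["rice", "wheat", "almond", "dates", "walnut", "daal"] : List String) "daal").getD 0 : Nat) : Int)).getD 0 : Int) = 28 := by decide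
  have hk : (PySem.List.pyGet? kilograms (((PySem.List.index? items i).getD 0 : Nat) : Int)).getD 0
      = kgv items kilograms i := rfl
  rw [priceOf_cases]
  simp only [groceriesL, priceL, List.foldl, beq_iff_eq]
  simp only [e1, e2, e3, e4, e5, e6, hk]
  split_ifs
  all_goals try ring
  all_goals (exfalso; subst_vars; simp_all)

theorem bill_calculation_eq_sum (items : List String) (kilograms : List Int) :
    bill_calculation items kilograms
      = (items.map (fun i => priceOf i * kgv items kilograms i)).sum := by
  unfold bill_calculation
  have hfun : (fun (total_price : Int) (i : String) =>
      groceriesL.foldl (fun total_price j =>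
        if i == j then
          let index1 : Int := ((PySem.List.index? groceriesL j).getD 0 : Nat)
          let index2 : Int := ((PySem.List.index? items i).getD 0 : Nat)
          total_price + ((PySem.List.pyGet? priceL index1).getD 0 * (PySem.List.pyGet? kilograms index2).getD 0)
        else total_price) total_price)
      = (fun (t : Int) (i : String) => t + priceOf i * kgv items kilograms i) := by
    funext t i; exact inner_fold_eq items kilograms i t
  rw [hfun, PySem.List.foldl_add, zero_add]

theorem index?_eq_of_count_le_one (i : String) :
    ∀ (xs : List String) (k : Nat) (hk : k < xs.length),
      xs.count i ≤ 1 → xs[k] = i → PySem.List.index? xs i = some k := by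
  intro xs
  induction xs with
  | nil => intro k hk; simp at hk
  | cons x rest ih =>
      intro k hk hcnt hget
      cases k with
      | zero =>
          simp at hget
          subst hget
          exact PySem.List.index?_cons_self _ _
      | succ k =>
          simp at hget hk
          have hmem : i ∈ rest := List.mem_of_getElem hget
          have hne : x ≠ i := by
            intro he
            subst he
            have h1 : 0 < rest.count x := List.count_pos_iff.mpr hmem
            simp [List.count_cons_self] at hcnt
            omega
          rw [PySem.List.index?_cons_of_ne rest hne]
          have hcnt' : rest.count i ≤ 1 := by
            by_cases hxe : x = i
            · exact absurd hxe hne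
            · simpa [List.count_cons, hxe] using hcnt
          rw [ih k hk hcnt' hget]
          rfl

theorem sum_zip_of_pointwise (F KG : String → Int) :
    ∀ (xs : List String) (ys : List Int),
      (∀ k (hk : k < xs.length), F xs[k] ≠ 0 → ∃ hy : k < ys.length, KG xs[k] = ys[k]) →
      (xs.map (fun i => F i * KG i)).sum = ((xs.zip ys).map (fun p => F p.1 * p.2)).sum := by
  intro xs
  induction xs with
  | nil => intro ys h; simp
  | cons x rest ih =>
      intro ys h
      cases ys with
      | nil =>
          have hx : F x = 0 := by
            by_contra hne
            obtain ⟨hy, _⟩ := h 0 (by simp) (by simpa using hne)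
            simp at hy
          have hr : (rest.map (fun i => F i * KG i)).sum = 0 := by
            rw [ih []]
            · simp
            · intro k hk hne
              obtain ⟨hy, _⟩ := h (k+1) (by simpa using Nat.succ_lt_succ hk) (by simpa using hne)
              simp at hy
          simp [hx, hr]
      | cons y ys' =>
          have hrest := ih ys' (fun k hk hne => by
            obtain ⟨hy, he⟩ := h (k+1) (by simpa using Nat.succ_lt_succ hk) (by simpa using hne)
            exact ⟨by simpa using hy, by simpa using he⟩)
          by_cases hx : F x = 0
          · simp [hx, hrest]
          · obtain ⟨_, he⟩ := h 0 (by simp) (by simpa using hx)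
            simp at he
            simp [he, hrest]

theorem main_eq (items : List String) (kilograms : List Int)
    (hpre : Pre_bill_calculation items kilograms) :
    bill_calculation items kilograms = bill_calculation_alt items kilograms := by
  obtain ⟨hidxlt, hnodup⟩ := hpre
  rw [bill_calculation_eq_sum]
  unfold bill_calculation_alt
  apply sum_zip_of_pointwise priceOf (kgv items kilograms) items kilograms
  intro k hk hne
  have hg : items[k] ∈ groceriesL := priceOf_ne_zero_mem _ hne
  have hmem : items[k] ∈ items := List.getElem_mem hk
  have hcnt : items.count items[k] ≤ 1 := hnodup items[k] hg
  have hidx : PySem.List.index? items items[k] = some k :=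
    index?_eq_of_count_le_one items[k] items k hk hcnt rfl
  have hlen : k < kilograms.length := by
    have := hidxlt items[k] hg hmem
    rw [hidx] at this
    simpa using this
  refine ⟨hlen, ?_⟩
  unfold kgv
  rw [hidx]
  simp [PySem.List.pyGet?_natCast, List.getElem?_eq_getElem hlen]

-- ===== VERDICT (by name: the statement is the Claim_ definition above) =====
theorem bill_calculation_spec : Claim_equal_bill_calculation := by
  intro items kilograms _ hpre
  unfold Spec_bill_calculation
  exact main_eq items kilograms hpre
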